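-- pv_equiv track=rewrite | github.com/BenoitBOMPOL/COGT_Hypergraphs | hypergraph.py | min_inclusion_wise
-- ===== SOURCE A (Python) =====
-- def min_inclusion_wise(S):
--     res = []
--     for set in S:
--         min_incl = True
--         for set2 in S:
--             if set2 != set:
--                 is_included = True
--                 for x in set2:
--                     if x not in set:
--                         is_included = False
--                 if is_included:
--                     min_incl = False
--         if min_incl:
--             res.append(set)
--     return res
-- ===== SOURCE B (Python) =====
-- def min_inclusion_wise(S):
--     # size-sorted sweep: only candidates with no more distinct values can be contained
--     pairs = sorted([(frozenset(s), s) for s in S], key=lambda p: len(p[0]))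
--     kept = []
--     for F, s in pairs:
--         ok = True
--         for F2, s2 in pairs:
--             if len(F2) > len(F):
--                 break
--             if s2 != s and F2 <= F:
--                 ok = False
--                 break
--         if ok:
--             kept.append(s)
--     return [s for s in S if s in kept]
-- ===== Notes on version B (the rewrite author's own statement) =====
-- stated objective: faster
-- what changed: A runs a cubic all-pairs scan whose containment test walks both lists element by element with no early exit; B precomputes each list's distinct-value frozenset once, sorts by distinct size, and for each set sweeps only the size-sorted prefix with hashed subset tests, breaking at the size bound or the first containing candidate, then emits survivors in original input order.
import Mathlib
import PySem

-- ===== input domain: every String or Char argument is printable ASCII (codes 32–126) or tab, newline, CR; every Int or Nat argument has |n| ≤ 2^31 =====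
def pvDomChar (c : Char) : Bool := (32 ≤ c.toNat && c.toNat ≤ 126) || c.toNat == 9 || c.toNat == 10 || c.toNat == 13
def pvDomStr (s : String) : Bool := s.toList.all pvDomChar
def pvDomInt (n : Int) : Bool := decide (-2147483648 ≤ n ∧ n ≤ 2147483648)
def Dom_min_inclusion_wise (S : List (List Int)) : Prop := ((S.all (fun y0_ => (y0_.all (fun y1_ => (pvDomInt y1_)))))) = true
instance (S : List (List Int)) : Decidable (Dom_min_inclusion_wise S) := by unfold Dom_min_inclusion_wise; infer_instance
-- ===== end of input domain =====

-- B replaces A's all-pairs nested membership scans by a distinct-size-sorted sweep with early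
-- termination (only candidates with no more distinct values can be contained); objective: faster (measured).

-- ===== PORT A =====
def min_inclusion_wise (S : List (List Int)) : List (List Int) :=
  S.foldl (fun res set =>
    let min_incl := S.foldl (fun min_incl set2 =>
      if set2 ≠ set then
        let is_included := set2.foldl (fun is_included x =>
          if !(set.contains x) then false else is_included) true
        if is_included then false else min_incl
      else min_incl) true
    if min_incl then res ++ [set] else res) []

-- ===== PORT B =====
-- inner loop of Source B: scan the size-sorted pairs, break once the distinct size exceeds |F|,
-- return False (ok = False) as soon as a value-distinct contained candidate is found
def pvScan (F s : List Int) : List (List Int × List Int) → Bool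
  | [] => true
  | (F2, s2) :: rest =>
    if F.length < F2.length then true
    else if s2 != s && PySem.Set.issubset F2 F then false
    else pvScan F s rest

-- pairs = sorted([(frozenset(s), s) for s in S], key=lambda p: len(p[0]))
def pvPairs (S : List (List Int)) : List (List Int × List Int) :=
  PySem.List.sorted (S.map (fun s => (PySem.Set.ofList s, s))) (fun p => p.1.length)

def min_inclusion_wise_alt (S : List (List Int)) : List (List Int) :=
  let pairs := pvPairs S
  let kept := pairs.foldl (fun kept p => if pvScan p.1 p.2 pairs then kept ++ [p.2] else kept) []
  S.filter (fun s => kept.contains s)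

-- ===== PRECONDITION & SPEC =====
def Spec_min_inclusion_wise (S : List (List Int)) (out : List (List Int)) : Prop := out = min_inclusion_wise_alt S
instance (S : List (List Int)) (out : List (List Int)) : Decidable (Spec_min_inclusion_wise S out) := by unfold Spec_min_inclusion_wise; infer_instance

-- ===== CLAIM (what is proved, stated in full; the proofs are below) =====
def Claim_equal_min_inclusion_wise : Prop := ∀ (S : List (List Int)), Dom_min_inclusion_wise S → Spec_min_inclusion_wise S (min_inclusion_wise S)

-- ===== LEMMAS AND PROOFS =====

-- 'some s2 ∈ S is value-distinct from s and every element of s2 occurs in s' (A's elimination test)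
def pvElim (S : List (List Int)) (s : List Int) : Bool :=
  S.any (fun s2 => s2 != s && s2.all (fun x => s.contains x))

-- a fold whose step is 'and with g x' computes 'b && all g'
theorem pv_foldl_and {α : Type} (g : α → Bool) (l : List α) (f : Bool → α → Bool)
    (h : ∀ b x, f b x = (b && g x)) (b : Bool) : l.foldl f b = (b && l.all g) := by
  induction l generalizing b with
  | nil => simp
  | cons x t ih => simp [h, ih, Bool.and_assoc]

theorem portA_eq_filter (S : List (List Int)) :
    min_inclusion_wise S = S.filter (fun s => !pvElim S s) := by
  unfold min_inclusion_wise
  have hmid : ∀ set : List Int, S.foldl (fun min_incl set2 =>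
      if set2 ≠ set then
        let is_included := set2.foldl (fun is_included x =>
          if !(set.contains x) then false else is_included) true
        if is_included then false else min_incl
      else min_incl) true = !pvElim S set := by
    intro set
    rw [pv_foldl_and (g := fun s2 => !(s2 != set && s2.all (fun x => set.contains x)))]
    · simp only [Bool.true_and, pvElim, List.not_any_eq_all_not]
    · intro b s2
      by_cases he : s2 = set
      · simp [he]
      · have hinner : s2.foldl (fun is_included x =>
            if !(set.contains x) then false else is_included) true
            = s2.all (fun x => set.contains x) := by
          rw [pv_foldl_and (g := fun x => set.contains x)]
          · simp
          · intro b' x; by_cases hc : set.contains x <;> simp [Bool.and_comm]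
        rw [if_pos he, hinner]
        cases h : s2.all (fun x => set.contains x) <;> simp [he]
  have hfun : (fun (res : List (List Int)) set =>
      let min_incl := S.foldl (fun min_incl set2 =>
        if set2 ≠ set then
          let is_included := set2.foldl (fun is_included x =>
            if !(set.contains x) then false else is_included) true
          if is_included then false else min_incl
        else min_incl) true
      if min_incl then res ++ [set] else res)
      = fun res set => if !pvElim S set then res ++ [set] else res := by
    funext res set
    rw [hmid set]
  rw [hfun, PySem.List.foldl_append_if_eq_filter, List.nil_append]

-- a value-distinct set with MORE distinct elements can never be contained
theorem pv_issubset_false_of_long (F G : List Int) (hn : G.Nodup) (h : F.length < G.length) :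
    PySem.Set.issubset G F = false := by
  rw [Bool.eq_false_iff]
  intro hc
  have hsub : G ⊆ F := fun x hx => (PySem.Set.issubset_iff G F).mp hc x hx
  exact absurd (List.subperm_of_subset hn hsub).length_le (by omega)

-- the early-exit scan over a size-sorted list decides the same predicate as a full scan
theorem pvScan_eq_not_any (F s : List Int) (l : List (List Int × List Int))
    (hs : l.Pairwise (fun a b => a.1.length ≤ b.1.length))
    (hn : ∀ p ∈ l, (p.1 : List Int).Nodup) :
    pvScan F s l = !(l.any (fun p => p.2 != s && PySem.Set.issubset p.1 F)) := by
  induction l with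
  | nil => simp [pvScan]
  | cons p t ih =>
    obtain ⟨F2, s2⟩ := p
    rw [pvScan]
    by_cases hlen : F.length < F2.length
    · rw [if_pos hlen]
      have hhead : PySem.Set.issubset F2 F = false :=
        pv_issubset_false_of_long F F2 (hn (F2, s2) (List.mem_cons_self)) hlen
      have htail : ∀ q ∈ t, PySem.Set.issubset q.1 F = false := by
        intro q hq
        have : F2.length ≤ q.1.length := (List.pairwise_cons.mp hs).1 q hq
        exact pv_issubset_false_of_long F q.1 (hn q (List.mem_cons_of_mem _ hq)) (by omega)
      symm
      simp only [Bool.not_eq_eq_eq_not, Bool.not_true, List.any_eq_false]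
      rintro ⟨G, s3⟩ hmem
      rcases List.mem_cons.mp hmem with hx | hx
      · simp [Prod.ext_iff] at hx
        simp [hx.1, hhead]
      · simp [htail _ hx]
    · rw [if_neg hlen]
      cases hc : (s2 != s && PySem.Set.issubset F2 F) with
      | true => simp [hc]
      | false =>
        rw [ih (List.pairwise_cons.mp hs).2 (fun q hq => hn q (List.mem_cons_of_mem _ hq))]
        simp [hc]

-- set(s2) <= set(s) is A's element-wise membership test
theorem pv_issubset_ofList_eq_all (s2 s : List Int) :
    PySem.Set.issubset (PySem.Set.ofList s2) (PySem.Set.ofList s) = s2.all (fun x => s.contains x) := by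
  rw [Bool.eq_iff_iff]
  simp [PySem.Set.issubset_iff, PySem.Set.mem_ofList, List.all_eq_true]

theorem pvPairs_perm (S : List (List Int)) :
    (pvPairs S).Perm (S.map (fun s => (PySem.Set.ofList s, s))) :=
  PySem.List.sorted_perm _ _ _

theorem pvPairs_fst (S : List (List Int)) :
    ∀ q ∈ pvPairs S, q.1 = PySem.Set.ofList q.2 := by
  intro q hq
  obtain ⟨s, _, rfl⟩ := List.mem_map.mp ((pvPairs_perm S).mem_iff.mp hq)
  rfl

-- on a pair of the sorted list, B's scan computes exactly A's elimination test
theorem pvScan_pairs (S : List (List Int)) (p : List Int × List Int) (hp : p ∈ pvPairs S) :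
    pvScan p.1 p.2 (pvPairs S) = !pvElim S p.2 := by
  have hsorted : (pvPairs S).Pairwise (fun a b => a.1.length ≤ b.1.length) :=
    PySem.List.sorted_pairwise _ _
  have hnod : ∀ q ∈ pvPairs S, (q.1 : List Int).Nodup := by
    intro q hq; rw [pvPairs_fst S q hq]; exact PySem.Set.nodup_ofList _
  rw [pvScan_eq_not_any _ _ _ hsorted hnod, (pvPairs_perm S).any_eq]
  rw [List.any_map]
  congr 1
  rw [pvPairs_fst S p hp]
  refine PySem.List.any_congr_mem ?_
  intro s2 _
  simp only [Function.comp, pv_issubset_ofList_eq_all]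

theorem portB_eq_filter (S : List (List Int)) :
    min_inclusion_wise_alt S = S.filter (fun s => !pvElim S s) := by
  show S.filter (fun s => ((pvPairs S).foldl (fun kept p =>
      if pvScan p.1 p.2 (pvPairs S) then kept ++ [p.2] else kept) []).contains s)
      = S.filter (fun s => !pvElim S s)
  rw [PySem.List.foldl_append_if (p := fun p => pvScan p.1 p.2 (pvPairs S))
      (f := fun p : List Int × List Int => p.2), List.nil_append]
  apply List.filter_congr
  intro s hsS
  rw [Bool.eq_iff_iff]
  simp only [List.contains_iff_mem, List.mem_map, List.mem_filter]
  constructor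
  · rintro ⟨p, ⟨hp, hpred⟩, h2⟩
    rw [← h2]
    rw [← pvScan_pairs S p hp]
    exact hpred
  · intro h
    refine ⟨(PySem.Set.ofList s, s), ⟨?_, ?_⟩, rfl⟩
    · exact (pvPairs_perm S).mem_iff.mpr (List.mem_map.mpr ⟨s, hsS, rfl⟩)
    · rw [pvScan_pairs S _ ((pvPairs_perm S).mem_iff.mpr (List.mem_map.mpr ⟨s, hsS, rfl⟩))]
      exact h

-- ===== VERDICT (by name: the statement is the Claim_ definition above) =====
theorem min_inclusion_wise_spec : Claim_equal_min_inclusion_wise := by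
  intro S _
  unfold Spec_min_inclusion_wise
  rw [portA_eq_filter, portB_eq_filter]
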